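-- pv_equiv track=rewrite | github.com/csernazs/misc | aoc/2022/aoc_25.py | int2snafu_list
-- ===== SOURCE A (Python) =====
-- def to_base5(x: int) -> list[int]:
--     assert x >= 0
--     parts: list[int] = []
--     if x == 0:
--         return [0]
--
--     while x > 0:
--         x, mod = divmod(x, 5)
--         parts.append(mod)
--
--     parts.reverse()
--     return parts
--
-- def int2snafu_list(x: int) -> list[int]:
--     base5 = to_base5(x)
--     base5.reverse()
--     new_digits = []
--
--     addition = 0
--     for digit in base5:
--         d = digit + addition
--         if d > 2:
--             d = d - 5
--             addition = 1
--             new_digits.append(d)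
--         else:
--             addition = 0
--             new_digits.append(d)
--
--     if addition > 0:
--         new_digits.append(addition)
--
--     new_digits.reverse()
--     return new_digits
-- ===== SOURCE B (Python) =====
-- def int2snafu_list(x: int) -> list[int]:
--     assert x >= 0
--     if x == 0:
--         return [0]
--     digits = []
--     while x > 0:
--         rem = x % 5
--         if rem <= 2:
--             digits.append(rem)
--             x //= 5
--         else:
--             digits.append(rem - 5)
--             x = x // 5 + 1
--     digits.reverse()
--     return digits
-- ===== Notes on version B (the rewrite author's own statement) =====
-- stated objective: simpler
-- what changed: B converts directly to balanced base-5 in one while-loop, folding the borrow into the division step, instead of A's three passes (build base-5 digit list, reverse, separate carry-propagation pass, reverse again).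
import Mathlib
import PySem

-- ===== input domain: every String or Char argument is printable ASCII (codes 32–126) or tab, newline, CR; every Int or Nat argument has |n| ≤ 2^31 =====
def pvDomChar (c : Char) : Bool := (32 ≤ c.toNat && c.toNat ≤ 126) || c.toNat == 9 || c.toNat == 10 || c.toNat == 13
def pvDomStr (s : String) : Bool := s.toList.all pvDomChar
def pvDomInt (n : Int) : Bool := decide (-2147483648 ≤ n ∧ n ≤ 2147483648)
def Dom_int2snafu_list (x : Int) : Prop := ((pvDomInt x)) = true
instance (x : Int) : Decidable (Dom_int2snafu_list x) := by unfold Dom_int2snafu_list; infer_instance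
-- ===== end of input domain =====

-- B does the SNAFU (balanced base-5) conversion in one direct while-loop, folding the
-- borrow into the division step, instead of A's base-5 list + separate carry pass (objective: simpler).

-- ===== PORT A =====
-- while x > 0: x, mod = divmod(x, 5); parts.append(mod)
def to_base5_loop (x : Int) (parts : List Int) : List Int :=
  if _h : 0 < x then
    to_base5_loop (PySem.Int.floordiv x 5) (parts ++ [PySem.Int.mod x 5])
  else parts
termination_by x.toNat
decreasing_by
  rw [PySem.Int.floordiv_eq_ediv_of_pos (by norm_num)]; omega

def to_base5 (x : Int) : List Int :=
  if x = 0 then [0] else (to_base5_loop x []).reverse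

-- the 'for digit in base5' loop; returns (new_digits, addition)
def carry_loop (addition : Int) (nd : List Int) : List Int → List Int × Int
  | [] => (nd, addition)
  | digit :: rest =>
    let d := digit + addition
    if d > 2 then carry_loop 1 (nd ++ [d - 5]) rest
    else carry_loop 0 (nd ++ [d]) rest

def int2snafu_list (x : Int) : List Int :=
  let base5 := (to_base5 x).reverse
  let p := carry_loop 0 [] base5
  let nd := if p.2 > 0 then p.1 ++ [p.2] else p.1
  nd.reverse

-- ===== PORT B =====
-- while x > 0: rem = x % 5; append rem (x //= 5) or rem-5 (x = x//5 + 1)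
def snafu_loop (x : Int) (digits : List Int) : List Int :=
  if _h : 0 < x then
    if PySem.Int.mod x 5 ≤ 2 then snafu_loop (PySem.Int.floordiv x 5) (digits ++ [PySem.Int.mod x 5])
    else snafu_loop (PySem.Int.floordiv x 5 + 1) (digits ++ [PySem.Int.mod x 5 - 5])
  else digits
termination_by x.toNat
decreasing_by
  · rw [PySem.Int.floordiv_eq_ediv_of_pos (by norm_num)]; omega
  · rename_i hr
    rw [PySem.Int.mod_eq_emod_of_pos (by norm_num)] at hr
    rw [PySem.Int.floordiv_eq_ediv_of_pos (by norm_num)]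
    omega

def int2snafu_list_alt (x : Int) : List Int :=
  if x = 0 then [0] else (snafu_loop x []).reverse

-- ===== PRECONDITION & SPEC =====
-- Pre_ excludes x < 0, where Python A (and B) raise AssertionError.
def Pre_int2snafu_list (x : Int) : Prop := 0 ≤ x
instance (x : Int) : Decidable (Pre_int2snafu_list x) := by unfold Pre_int2snafu_list; infer_instance
def pvWitness_int2snafu_list : Int := (2022)

def Spec_int2snafu_list (x : Int) (out : List Int) : Prop := out = int2snafu_list_alt x
instance (x : Int) (out : List Int) : Decidable (Spec_int2snafu_list x out) := by unfold Spec_int2snafu_list; infer_instance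

-- ===== CLAIM (what is proved, stated in full; the proofs are below) =====
def Claim_equal_int2snafu_list : Prop := ∀ (x : Int), Dom_int2snafu_list x → Pre_int2snafu_list x → Spec_int2snafu_list x (int2snafu_list x)

-- ===== LEMMAS AND PROOFS =====

-- little-endian base-5 digits (cons form of A's first loop)
def dig (x : Int) : List Int :=
  if _h : 0 < x then PySem.Int.mod x 5 :: dig (PySem.Int.floordiv x 5) else []
termination_by x.toNat
decreasing_by
  rw [PySem.Int.floordiv_eq_ediv_of_pos (by norm_num)]; omega

-- cons form of A's carry pass
def goP (addition : Int) : List Int → List Int × Int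
  | [] => ([], addition)
  | digit :: rest =>
    let d := digit + addition
    if d > 2 then let p := goP 1 rest; ((d - 5) :: p.1, p.2)
    else let p := goP 0 rest; (d :: p.1, p.2)

def gofull (addition : Int) (ds : List Int) : List Int :=
  let p := goP addition ds
  if p.2 > 0 then p.1 ++ [p.2] else p.1

-- cons form of B's loop
def bl (x : Int) : List Int :=
  if _h : 0 < x then
    if PySem.Int.mod x 5 ≤ 2 then PySem.Int.mod x 5 :: bl (PySem.Int.floordiv x 5)
    else (PySem.Int.mod x 5 - 5) :: bl (PySem.Int.floordiv x 5 + 1)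
  else []
termination_by x.toNat
decreasing_by
  · rw [PySem.Int.floordiv_eq_ediv_of_pos (by norm_num)]; omega
  · rename_i hr
    rw [PySem.Int.mod_eq_emod_of_pos (by norm_num)] at hr
    rw [PySem.Int.floordiv_eq_ediv_of_pos (by norm_num)]
    omega

theorem to_base5_loop_eq (x : Int) (parts : List Int) :
    to_base5_loop x parts = parts ++ dig x := by
  fun_induction to_base5_loop x parts with
  | case1 x parts h ih => rw [dig, dif_pos h, ih]; simp
  | case2 x parts h => rw [dig, dif_neg h]; simp

theorem snafu_loop_eq (x : Int) (digits : List Int) :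
    snafu_loop x digits = digits ++ bl x := by
  fun_induction snafu_loop x digits with
  | case1 x digits h hrem ih =>
    rw [bl, dif_pos h, if_pos hrem, ih]; simp
  | case2 x digits h hrem ih =>
    rw [bl, dif_pos h, if_neg hrem, ih]; simp
  | case3 x digits h => rw [bl, dif_neg h]; simp

theorem carry_loop_eq (ds : List Int) : ∀ (addition : Int) (nd : List Int),
    carry_loop addition nd ds = (nd ++ (goP addition ds).1, (goP addition ds).2) := by
  induction ds with
  | nil => intro addition nd; simp [carry_loop, goP]
  | cons digit rest ih =>
    intro addition nd
    simp only [carry_loop, goP]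
    split <;> rw [ih] <;> simp

theorem gofull_cons (addition digit : Int) (rest : List Int) :
    gofull addition (digit :: rest) =
      if digit + addition > 2 then (digit + addition - 5) :: gofull 1 rest
      else (digit + addition) :: gofull 0 rest := by
  simp only [gofull, goP]
  split <;> split <;> simp

theorem dig_pos (x : Int) (h : 0 < x) :
    dig x = PySem.Int.mod x 5 :: dig (PySem.Int.floordiv x 5) := by
  rw [dig, dif_pos h]

theorem bl_pos (x : Int) (h : 0 < x) :
    bl x = if PySem.Int.mod x 5 ≤ 2 then PySem.Int.mod x 5 :: bl (PySem.Int.floordiv x 5)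
           else (PySem.Int.mod x 5 - 5) :: bl (PySem.Int.floordiv x 5 + 1) := by
  rw [bl, dif_pos h]

-- shared base case: x = 0
theorem base_case (addition : Int) (h : addition = 0 ∨ addition = 1) :
    gofull addition (dig 0) = bl (0 + addition) := by
  have hd : dig 0 = [] := by rw [dig]; simp
  have hb0 : bl 0 = [] := by rw [bl]; simp
  rcases h with h | h <;> subst h
  · simp [hd, gofull, goP, hb0]
  · have hb1 : bl 1 = [1] := by
      rw [bl_pos 1 (by norm_num),
          show PySem.Int.mod 1 5 = 1 from by decide,
          show PySem.Int.floordiv 1 5 = 0 from by decide]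
      simp [hb0]
    simp [hd, gofull, goP, hb1]

-- the heart: A's carry pass over the base-5 digits equals B's direct loop
theorem main_lemma : ∀ (n : Nat) (x : Int), 0 ≤ x → x.toNat ≤ n →
    ∀ addition : Int, addition = 0 ∨ addition = 1 →
    gofull addition (dig x) = bl (x + addition) := by
  intro n
  induction n with
  | zero =>
    intro x hx hn addition hadd
    have hx0 : x = 0 := by omega
    subst hx0
    exact base_case addition hadd
  | succ k ih =>
    intro x hx hn addition hadd
    by_cases hpos : 0 < x
    · rw [dig_pos x hpos, gofull_cons]
      have h5 : (0:Int) < 5 := by norm_num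
      rw [PySem.Int.mod_eq_emod_of_pos h5, PySem.Int.floordiv_eq_ediv_of_pos h5]
      have hq1 : 0 ≤ x / 5 := by omega
      have hq2 : (x / 5).toNat ≤ k := by omega
      have ihq0 := ih (x / 5) hq1 hq2 0 (Or.inl rfl)
      have ihq1 := ih (x / 5) hq1 hq2 1 (Or.inr rfl)
      simp only [add_zero] at ihq0
      rcases hadd with h | h <;> subst h
      · -- addition = 0
        simp only [add_zero]
        rw [bl_pos x hpos, PySem.Int.mod_eq_emod_of_pos h5, PySem.Int.floordiv_eq_ediv_of_pos h5]
        by_cases hd : x % 5 > 2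
        · rw [if_pos hd, if_neg (by omega), ihq1]
        · rw [if_neg hd, if_pos (by omega), ihq0]
      · -- addition = 1
        have hpos1 : 0 < x + 1 := by omega
        rw [bl_pos (x + 1) hpos1, PySem.Int.mod_eq_emod_of_pos h5, PySem.Int.floordiv_eq_ediv_of_pos h5]
        by_cases hm4 : x % 5 = 4
        · -- digit + 1 = 5 > 2 on A's side; (x+1)%5 = 0 ≤ 2 on B's side
          rw [if_pos (by omega)]
          have e1 : (x + 1) % 5 = 0 := by omega
          have e2 : (x + 1) / 5 = x / 5 + 1 := by omega
          rw [if_pos (by omega), e1, e2, ihq1, show x % 5 + 1 - 5 = 0 from by omega]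
        · have e1 : (x + 1) % 5 = x % 5 + 1 := by omega
          have e2 : (x + 1) / 5 = x / 5 := by omega
          by_cases hd : x % 5 + 1 > 2
          · rw [if_pos hd, if_neg (by omega), e1, e2, ihq1]
          · rw [if_neg hd, if_pos (by omega), e1, e2, ihq0]
    · have hx0 : x = 0 := by omega
      subst hx0
      exact base_case addition hadd

-- ===== VERDICT (by name: the statement is the Claim_ definition above) =====
theorem int2snafu_list_spec : Claim_equal_int2snafu_list := by
  unfold Claim_equal_int2snafu_list Spec_int2snafu_list Pre_int2snafu_list
  intro x _ hx
  by_cases hz : x = 0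
  · subst hz; decide
  · have hpos : 0 < x := by omega
    unfold int2snafu_list int2snafu_list_alt to_base5
    rw [if_neg hz, if_neg hz]
    simp only [List.reverse_reverse]
    rw [to_base5_loop_eq, snafu_loop_eq, carry_loop_eq]
    simp only [List.nil_append]
    have := main_lemma x.toNat x (le_of_lt hpos) (le_refl _) 0 (Or.inl rfl)
    simp only [add_zero] at this
    rw [show (if (goP 0 (dig x)).2 > 0 then (goP 0 (dig x)).1 ++ [(goP 0 (dig x)).2]
             else (goP 0 (dig x)).1) = gofull 0 (dig x) from rfl, this]
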